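-- pv_equiv track=rewrite | github.com/rishabh1507/script_python | base_logs.py | log_dict
-- ===== SOURCE A (Python) =====
-- def log_dict(temp_result3):
--     d1 = dict()
--     li = temp_result3
--     for i in range(len(li)-2):
--         temp_li = li[i].split(',')
--         key1,val1 = temp_li[0],temp_li[1]
--         if(key1 not in d1):
--             d1[key1] = list()
--             d1[key1].append(val1)
--         else:
--             d1[key1].append(val1)
--     return d1
-- ===== SOURCE B (Python) =====
-- def log_dict(temp_result3):
--     rows = [line.split(',') for line in temp_result3[:len(temp_result3) - 2]]
--     keys = list(dict.fromkeys(parts[0] for parts in rows))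
--     return {k: [parts[1] for parts in rows if parts[0] == k] for k in keys}
-- ===== Notes on version B (the rewrite author's own statement) =====
-- stated objective: alternative
-- what changed: Replaces the incremental membership-tested dict insertion loop with a two-phase grouping: split all lines once, dedup the keys in first-appearance order, then build each value list by a per-key scan (dict comprehension).
import Mathlib
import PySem

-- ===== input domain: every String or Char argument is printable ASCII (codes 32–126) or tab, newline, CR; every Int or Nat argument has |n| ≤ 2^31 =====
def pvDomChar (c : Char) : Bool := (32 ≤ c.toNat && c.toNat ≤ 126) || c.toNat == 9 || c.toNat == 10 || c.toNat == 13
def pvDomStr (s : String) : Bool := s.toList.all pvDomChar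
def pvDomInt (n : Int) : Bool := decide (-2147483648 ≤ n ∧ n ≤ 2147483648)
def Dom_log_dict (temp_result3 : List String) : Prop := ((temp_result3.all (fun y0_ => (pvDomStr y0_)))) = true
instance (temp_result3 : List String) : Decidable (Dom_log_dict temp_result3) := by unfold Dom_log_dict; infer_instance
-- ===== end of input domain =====

-- B groups in two phases (split all lines once, dedup keys in first-appearance order, per-key scans
-- building each value list) instead of A's incremental membership-tested dict insertion; same result.


-- ===== PORT A =====
def log_dict (temp_result3 : List String) : List (String × List String) :=
  let li := temp_result3
  let d1 : PySem.Dict String (List String) :=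
    (PySem.List.pyRange 0 ((li.length : Int) - 2) 1).foldl (fun d1 i =>
      let temp_li := (PySem.Str.split? (PySem.List.pyGetD li i "") ",").getD []
      let key1 := PySem.List.pyGetD temp_li 0 ""
      let val1 := PySem.List.pyGetD temp_li 1 ""
      if d1.contains key1 = false then
        (d1.insert key1 []).modify key1 [] (fun l => l ++ [val1])
      else
        d1.modify key1 [] (fun l => l ++ [val1])) PySem.Dict.empty
  d1.items

-- ===== PORT B =====
def log_dict_alt (temp_result3 : List String) : List (String × List String) :=
  let rows := (PySem.List.slice temp_result3 none (some ((temp_result3.length : Int) - 2))).map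
      (fun line => (PySem.Str.split? line ",").getD [])
  let keys := PySem.List.dedup (rows.map (fun parts => PySem.List.pyGetD parts 0 ""))
  keys.map (fun k => (k,
    (rows.filter (fun parts => PySem.List.pyGetD parts 0 "" == k)).map
      (fun parts => PySem.List.pyGetD parts 1 "")))

-- ===== PRECONDITION & SPEC =====
-- Pre_ excludes inputs where some line among the first len-2 has no comma: there Python A raises
-- IndexError on temp_li[1] (split gives a single piece).
def Pre_log_dict (temp_result3 : List String) : Prop :=
  ∀ s ∈ temp_result3.take (temp_result3.length - 2), ',' ∈ s.toList
instance (temp_result3 : List String) : Decidable (Pre_log_dict temp_result3) := by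
  unfold Pre_log_dict; infer_instance
def pvWitness_log_dict : List String := ["a,1", "b,2", "a,3", "tail1", "tail2"]
def Spec_log_dict (temp_result3 : List String) (out : List (String × List String)) : Prop := out = log_dict_alt temp_result3
instance (temp_result3 : List String) (out : List (String × List String)) : Decidable (Spec_log_dict temp_result3 out) := by unfold Spec_log_dict; infer_instance

-- ===== CLAIM (what is proved, stated in full; the proofs are below) =====
def Claim_equal_log_dict : Prop := ∀ (temp_result3 : List String), Dom_log_dict temp_result3 → Pre_log_dict temp_result3 → Spec_log_dict temp_result3 (log_dict temp_result3)

-- ===== LEMMAS AND PROOFS =====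

-- key/value of a line, as both ports compute them
def pvKey (line : String) : String := PySem.List.pyGetD ((PySem.Str.split? line ",").getD []) 0 ""
def pvVal (line : String) : String := PySem.List.pyGetD ((PySem.Str.split? line ",").getD []) 1 ""

-- the prefix li[:len-2] is take (len-2)
lemma pvSlice (xs : List String) :
    PySem.List.slice xs none (some ((xs.length : Int) - 2)) = xs.take (xs.length - 2) := by
  by_cases h : 2 ≤ xs.length
  · have : ((xs.length : Int) - 2) = ((xs.length - 2 : Nat) : Int) := by omega
    rw [this, PySem.List.slice_to_natCast]
  · rcases xs with _ | ⟨a, _ | ⟨b, t⟩⟩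
    · rfl
    · rw [show ((([a] : List String).length : Int) - 2) = (-1 : Int) by simp,
        PySem.List.slice_to_neg_one]
      simp
    · simp at h

-- the range of A's loop equals range over the prefix length
lemma pvRange (n : Nat) :
    PySem.List.pyRange 0 ((n : Int) - 2) 1 = PySem.List.pyRange 0 (((n - 2 : Nat)) : Int) 1 := by
  by_cases h : 2 ≤ n
  · congr 1; omega
  · rw [PySem.List.pyRange_one_eq_nil (by omega), PySem.List.pyRange_one_eq_nil (by omega)]

-- one step of A's loop is a Dict.modify
lemma pvStep (d : PySem.Dict String (List String)) (k v : String) :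
    (if d.contains k = false then (d.insert k []).modify k [] (fun l => l ++ [v])
     else d.modify k [] (fun l => l ++ [v])) = d.modify k [] (fun l => l ++ [v]) := by
  by_cases h : d.contains k = false
  · simp only [h, if_true, PySem.Dict.modify, PySem.Dict.getD_insert_self,
      PySem.Dict.insert_insert_self, PySem.Dict.getD_of_not_contains d _ h, List.nil_append]
  · simp [h]

lemma pvSetUpdateNil (xs : List String) : PySem.Set.update ([] : PySem.Set String) xs = PySem.List.dedup xs := by
  rw [PySem.List.dedup_eq_ofList, PySem.Set.ofList_eq_foldl]; rfl

-- A's dict, folded over the prefix as a modify-loop over (key, value) pairs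
lemma pvFoldA (li : List String) :
    log_dict li =
      (((li.take (li.length - 2)).map (fun line => (pvKey line, pvVal line))).foldl
        (fun d p => d.modify p.1 [] (fun l => l ++ [p.2])) PySem.Dict.empty).items := by
  have hdef : log_dict li =
      ((PySem.List.pyRange 0 ((li.length : Int) - 2) 1).foldl (fun d1 i =>
        let temp_li := (PySem.Str.split? (PySem.List.pyGetD li i "") ",").getD []
        let key1 := PySem.List.pyGetD temp_li 0 ""
        let val1 := PySem.List.pyGetD temp_li 1 ""
        if d1.contains key1 = false then
          (d1.insert key1 []).modify key1 [] (fun l => l ++ [val1])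
        else
          d1.modify key1 [] (fun l => l ++ [val1])) PySem.Dict.empty).items := rfl
  rw [hdef]
  congr 1
  rw [pvRange li.length]
  have h1 : (((li.length - 2 : Nat)) : Int) = PySem.List.len (li.take (li.length - 2)) := by
    simp [PySem.List.len]
  rw [h1]
  rw [PySem.List.foldl_congr_mem _ _
      (fun d1 i =>
        if d1.contains (pvKey (PySem.List.pyGetD (li.take (li.length - 2)) i "")) = false then
          (d1.insert (pvKey (PySem.List.pyGetD (li.take (li.length - 2)) i "")) []).modify
            (pvKey (PySem.List.pyGetD (li.take (li.length - 2)) i "")) []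
            (fun l => l ++ [pvVal (PySem.List.pyGetD (li.take (li.length - 2)) i "")])
        else
          d1.modify (pvKey (PySem.List.pyGetD (li.take (li.length - 2)) i "")) []
            (fun l => l ++ [pvVal (PySem.List.pyGetD (li.take (li.length - 2)) i "")])) _ ?hcong]
  case hcong =>
    intro acc i hi
    have hm := (PySem.List.mem_pyRange_one (a := 0) (b := PySem.List.len (li.take (li.length - 2))) (x := i)).mp hi
    have h0 : 0 ≤ i := hm.1
    have hlt : i < ((li.take (li.length - 2)).length : Int) := by
      simpa [PySem.List.len] using hm.2
    have hlt' : i < (li.length : Int) := by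
      have := List.length_take_le (li.length - 2) li
      omega
    have hx : PySem.List.pyGetD li i "" = PySem.List.pyGetD (li.take (li.length - 2)) i "" := by
      rw [PySem.List.pyGetD_eq_getElem li "" h0 hlt',
          PySem.List.pyGetD_eq_getElem (li.take (li.length - 2)) "" h0 hlt]
      exact (List.getElem_take).symm
    simp only [pvKey, pvVal, hx]
  have h2 := PySem.List.foldl_pyRange_pyGetD (li.take (li.length - 2)) ""
      (fun d1 line =>
        if d1.contains (pvKey line) = false then
          (d1.insert (pvKey line) []).modify (pvKey line) [] (fun l => l ++ [pvVal line])
        else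
          d1.modify (pvKey line) [] (fun l => l ++ [pvVal line]))
      PySem.Dict.empty (a := 0) le_rfl
  simp only [Int.toNat_zero, List.drop_zero] at h2
  refine h2.trans ?_
  rw [List.foldl_map]
  exact PySem.List.foldl_congr_mem _ _ _ _ (fun acc x _ => pvStep acc (pvKey x) (pvVal x))

-- ===== VERDICT (by name: the statement is the Claim_ definition above) =====

theorem log_dict_spec : Claim_equal_log_dict := by
  intro li _ _
  unfold Spec_log_dict log_dict_alt
  rw [pvFoldA, pvSlice]
  set pre := li.take (li.length - 2) with hpre
  set l := pre.map (fun line => (pvKey line, pvVal line)) with hl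
  have hnodup : ((l.foldl (fun d p => d.modify p.1 [] (fun l => l ++ [p.2])) PySem.Dict.empty)).keys.Nodup := by
    exact PySem.Dict.nodup_keys_foldl_modify_key l Prod.fst [] (fun d p => fun lst => lst ++ [p.2]) _ List.nodup_nil
  rw [PySem.Dict.items_eq_map_keys _ hnodup []]
  rw [PySem.Dict.keys_foldl_modify_key l Prod.fst [] (fun d p => fun lst => lst ++ [p.2])]
  simp only [PySem.Dict.keys_empty]
  rw [pvSetUpdateNil]
  have hkeys : l.map Prod.fst = (pre.map (fun line => (PySem.Str.split? line ",").getD [])).map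
      (fun parts => PySem.List.pyGetD parts 0 "") := by
    simp [hl, List.map_map, pvKey, Function.comp]
  rw [hkeys]
  apply List.map_congr_left
  intro k _
  simp only [Prod.mk.injEq, true_and]
  rw [PySem.Dict.getD_foldl_modify_append l PySem.Dict.empty k]
  simp [hl, PySem.Dict.getD_empty, List.filter_map, List.map_map, pvKey, pvVal]
  rfl
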